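-- pv_equiv track=rewrite | github.com/abhinaya08/cognitive_analytics | Project/summarizer_model_utils.py | minibatches
-- ===== SOURCE A (Python) =====
-- def minibatches(inputs, targets, minibatch_size):
--     """batch generator. yields x and y batch.
--     """
--     x_batch, y_batch = [], []
--     for inp, tgt in zip(inputs, targets):
--         if len(x_batch) == minibatch_size and len(y_batch) == minibatch_size:
--             yield x_batch, y_batch
--             x_batch, y_batch = [], []
--         x_batch.append(inp)
--         y_batch.append(tgt)
--
--     if len(x_batch) != 0:
--         for inp, tgt in zip(inputs, targets):
--             if len(x_batch) != minibatch_size: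
--                 x_batch.append(inp)
--                 y_batch.append(tgt)
--             else:
--                 break
--         yield x_batch, y_batch
-- ===== SOURCE B (Python) =====
-- def minibatches(inputs, targets, minibatch_size):
--     """batch generator: yield (x_batch, y_batch) chunks of minibatch_size;
--     a short final chunk is padded by wrapping around to the start of the data."""
--     pairs = list(zip(inputs, targets))
--     n = len(pairs)
--     for i in range(0, n, minibatch_size):
--         chunk = pairs[i:i + minibatch_size]
--         if len(chunk) < minibatch_size:
--             chunk = chunk + pairs[:minibatch_size - len(chunk)]
--         yield [x for x, _ in chunk], [y for _, y in chunk]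
-- ===== Notes on version B (the rewrite author's own statement) =====
-- stated objective: alternative
-- what changed: A streams elements one by one, carrying a partial batch and yielding a full batch only when the next element arrives, then re-walks zip(inputs,targets) to pad; B materializes the zipped pairs once and slices chunk pairs[i:i+minibatch_size] per range(0,n,minibatch_size) start, padding a short last chunk with the prefix slice pairs[:minibatch_size-len(chunk)]. Pre_ excludes minibatch_size <= 0, where B's range raises ValueError (step 0) or yields nothing, while A's never-firing size guard returns degenerate duplicated batches.
-- outside the precondition, e.g. on minibatches([1, 2], [3, 4], -1): A returns [([1, 2, 1, 2], [3, 4, 3, 4])], B returns []; on minibatches([1], [2], 0): A returns [([], []), ([1, 1], [2, 2])], B raises ValueError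
import Mathlib
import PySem

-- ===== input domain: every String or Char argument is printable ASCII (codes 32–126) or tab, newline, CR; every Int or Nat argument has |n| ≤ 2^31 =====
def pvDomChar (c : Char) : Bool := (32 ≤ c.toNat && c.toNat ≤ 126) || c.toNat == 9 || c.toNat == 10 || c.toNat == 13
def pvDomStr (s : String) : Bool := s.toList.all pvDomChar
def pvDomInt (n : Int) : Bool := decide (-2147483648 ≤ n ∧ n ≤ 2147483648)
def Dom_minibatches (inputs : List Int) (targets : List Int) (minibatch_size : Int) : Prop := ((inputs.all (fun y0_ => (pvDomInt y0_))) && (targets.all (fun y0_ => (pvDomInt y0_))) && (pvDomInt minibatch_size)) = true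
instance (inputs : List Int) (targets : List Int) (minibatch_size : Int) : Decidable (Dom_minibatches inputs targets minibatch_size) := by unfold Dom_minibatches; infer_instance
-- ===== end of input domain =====

-- B slices fixed-size chunks out of the materialized pair list and pads a short last chunk
-- with a prefix slice, instead of A's element-by-element streaming with a carried partial batch.

-- ===== PORT A =====
-- body of A's main for-loop: state is (yielded batches, x_batch, y_batch)
def mbStepA (m : Int) (s : List (List Int × List Int) × List Int × List Int)
    (p : Int × Int) : List (List Int × List Int) × List Int × List Int :=
  if (s.2.1.length : Int) = m ∧ (s.2.2.length : Int) = m then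
    (s.1 ++ [(s.2.1, s.2.2)], [p.1], [p.2])
  else
    (s.1, s.2.1 ++ [p.1], s.2.2 ++ [p.2])

-- A's final padding for-loop (breaks once the batch is full)
def mbPadA (m : Int) (zs : List (Int × Int)) (xb yb : List Int) : List Int × List Int :=
  match zs with
  | [] => (xb, yb)
  | p :: rest =>
    if (xb.length : Int) ≠ m then mbPadA m rest (xb ++ [p.1]) (yb ++ [p.2])
    else (xb, yb)

def minibatches (inputs : List Int) (targets : List Int) (minibatch_size : Int) :
    List (List Int × List Int) :=
  let zs := inputs.zip targets
  let st := zs.foldl (mbStepA minibatch_size) ([], [], [])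
  if st.2.1.length ≠ 0 then st.1 ++ [mbPadA minibatch_size zs st.2.1 st.2.2] else st.1

-- ===== PORT B =====
-- body of B's loop over chunk starts
def mbBodyB (m : Int) (pairs : List (Int × Int))
    (out : List (List Int × List Int)) (i : Int) : List (List Int × List Int) :=
  let chunk := PySem.List.slice pairs (some i) (some (i + m))
  let chunk2 := if (chunk.length : Int) < m
    then chunk ++ PySem.List.slice pairs none (some (m - (chunk.length : Int)))
    else chunk
  out ++ [(chunk2.map Prod.fst, chunk2.map Prod.snd)]

def minibatches_alt (inputs : List Int) (targets : List Int) (minibatch_size : Int) :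
    List (List Int × List Int) :=
  let pairs := inputs.zip targets
  let n : Int := pairs.length
  (PySem.List.pyRange 0 n minibatch_size).foldl (mbBodyB minibatch_size pairs) []

-- ===== PRECONDITION & SPEC =====
-- Pre_ excludes minibatch_size ≤ 0: there B's range(0, n, minibatch_size) raises ValueError
-- (step 0) or is empty (negative step), while A's accumulate-then-pad loops return degenerate
-- duplicated batches that are an artefact of its guard never firing.
def Pre_minibatches (inputs : List Int) (targets : List Int) (minibatch_size : Int) : Prop :=
  1 ≤ minibatch_size
instance (inputs : List Int) (targets : List Int) (minibatch_size : Int) : Decidable (Pre_minibatches inputs targets minibatch_size) := by unfold Pre_minibatches; infer_instance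
def pvWitness_minibatches : List Int × List Int × Int := ([1, 2, 3], [4, 5, 6], 2)

def Spec_minibatches (inputs : List Int) (targets : List Int) (minibatch_size : Int) (out : List (List Int × List Int)) : Prop := out = minibatches_alt inputs targets minibatch_size
instance (inputs : List Int) (targets : List Int) (minibatch_size : Int) (out : List (List Int × List Int)) : Decidable (Spec_minibatches inputs targets minibatch_size out) := by unfold Spec_minibatches; infer_instance

-- ===== CLAIM (what is proved, stated in full; the proofs are below) =====
def Claim_equal_minibatches : Prop := ∀ (inputs : List Int) (targets : List Int) (minibatch_size : Int), Dom_minibatches inputs targets minibatch_size → Pre_minibatches inputs targets minibatch_size → Spec_minibatches inputs targets minibatch_size (minibatches inputs targets minibatch_size)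

-- ===== LEMMAS AND PROOFS =====

-- unzip a pair list into (xs, ys)
def mbUnz (l : List (Int × Int)) : List Int × List Int := (l.map Prod.fst, l.map Prod.snd)

-- chunks of size c+1
def mbChunks (c : Nat) : List (Int × Int) → List (List (Int × Int))
  | [] => []
  | a :: l => (a :: l.take c) :: mbChunks c (l.drop c)
  termination_by l => l.length
  decreasing_by simp

-- last element (default [])
def mbLast : List (List (Int × Int)) → List (Int × Int)
  | [] => []
  | [a] => a
  | _ :: b :: rest => mbLast (b :: rest)

theorem mbLast_cons {a : List (Int × Int)} {X : List (List (Int × Int))} (h : X ≠ []) :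
    mbLast (a :: X) = mbLast X := by
  cases X with
  | nil => exact absurd rfl h
  | cons b rest => rfl

-- A's padding loop appends exactly the first (m - len) pairs
theorem mbPadA_eq_take (m : Int) (zs : List (Int × Int)) (xb yb : List Int)
    (hxy : xb.length = yb.length) (h : (xb.length : Int) ≤ m) :
    mbPadA m zs xb yb =
      (xb ++ (zs.take (m - (xb.length : Int)).toNat).map Prod.fst,
       yb ++ (zs.take (m - (xb.length : Int)).toNat).map Prod.snd) := by
  induction zs generalizing xb yb with
  | nil => simp [mbPadA]
  | cons p rest ih =>
    simp only [mbPadA]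
    by_cases hm : (xb.length : Int) = m
    · rw [if_neg (by simpa using hm)]
      have : (m - (xb.length : Int)).toNat = 0 := by omega
      simp [this]
    · rw [if_pos hm]
      rw [ih (xb ++ [p.1]) (yb ++ [p.2]) (by simp [hxy]) (by simp; omega)]
      have hk : (m - (xb.length : Int)).toNat = (m - ((xb ++ [p.1]).length : Int)).toNat + 1 := by
        simp; omega
      rw [hk, List.take_succ_cons]
      simp

theorem mbChunks_nil (c : Nat) : mbChunks c [] = [] := by
  rw [mbChunks.eq_def]

theorem mbChunks_cons (c : Nat) (a : Int × Int) (t : List (Int × Int)) :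
    mbChunks c (a :: t) = (a :: t.take c) :: mbChunks c (t.drop c) := by
  rw [mbChunks.eq_def]

theorem mbChunks_ne_nil (c : Nat) (l : List (Int × Int)) (h : l ≠ []) : mbChunks c l ≠ [] := by
  cases l with
  | nil => exact absurd rfl h
  | cons a t => rw [mbChunks_cons]; simp

theorem mbChunks_small (c : Nat) (l : List (Int × Int)) (h1 : l ≠ []) (h2 : l.length ≤ c + 1) :
    mbChunks c l = [l] := by
  cases l with
  | nil => exact absurd rfl h1
  | cons a t =>
    simp at h2
    rw [mbChunks_cons, List.take_of_length_le h2, List.drop_of_length_le h2, mbChunks_nil]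

theorem mbLast_chunks_prop (c : Nat) :
    ∀ (d : Nat) (l : List (Int × Int)), l.length ≤ d → l ≠ [] →
      mbLast (mbChunks c l) ≠ [] ∧ (mbLast (mbChunks c l)).length ≤ c + 1 := by
  intro d
  induction d with
  | zero => intro l hd hl; cases l with
    | nil => exact absurd rfl hl
    | cons a t => simp at hd
  | succ d ih =>
    intro l hd hl
    cases l with
    | nil => exact absurd rfl hl
    | cons a t =>
      rw [mbChunks_cons]
      by_cases hdrop : t.drop c = []
      · rw [hdrop, mbChunks_nil, mbLast]
        constructor
        · simp
        · simp [List.length_take]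
      · rw [mbLast_cons (mbChunks_ne_nil c _ hdrop)]
        exact ih (t.drop c) (by simp at hd ⊢; omega) hdrop

-- A's fold, characterized by chunks
theorem mbFoldA (c : Nat) (l : List (Int × Int)) :
    ∀ (cur : List (Int × Int)) (out : List (List Int × List Int)),
      cur ≠ [] → cur.length ≤ c + 1 →
      l.foldl (mbStepA ((c : Int) + 1)) (out, mbUnz cur) =
        (out ++ ((mbChunks c (cur ++ l)).dropLast).map mbUnz,
         mbUnz (mbLast (mbChunks c (cur ++ l)))) := by
  induction l with
  | nil =>
    intro cur out h1 h2
    rw [List.append_nil, mbChunks_small c cur h1 h2]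
    simp [mbLast]
  | cons p rest ih =>
    intro cur out h1 h2
    rw [List.foldl_cons]
    by_cases hlen : cur.length = c + 1
    · have hstep : mbStepA ((c : Int) + 1) (out, mbUnz cur) p
          = (out ++ [mbUnz cur], mbUnz [p]) := by
        simp [mbStepA, mbUnz, hlen]
      rw [hstep, ih [p] (out ++ [mbUnz cur]) (by simp) (by simp)]
      obtain ⟨a, t, rfl⟩ : ∃ a t, cur = a :: t := by
        cases cur with
        | nil => exact absurd rfl h1
        | cons a t => exact ⟨a, t, rfl⟩
      have ht : t.length = c := by simpa using hlen
      have hch : mbChunks c ((a :: t) ++ p :: rest) = (a :: t) :: mbChunks c (p :: rest) := by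
        rw [List.cons_append, mbChunks_cons]
        rw [List.take_append_of_le_length (le_of_eq ht.symm), List.take_of_length_le (le_of_eq ht),
            List.drop_append_of_le_length (le_of_eq ht.symm), List.drop_of_length_le (le_of_eq ht)]
        simp
      have hne : mbChunks c (p :: rest) ≠ [] := mbChunks_ne_nil c _ (by simp)
      rw [hch, List.dropLast_cons_of_ne_nil hne, mbLast_cons hne]
      simp
    · have hstep : mbStepA ((c : Int) + 1) (out, mbUnz cur) p
          = (out, mbUnz (cur ++ [p])) := by
        have : ¬ ((cur.length : Int) = (c : Int) + 1) := by
          intro h; apply hlen; exact_mod_cast h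
        simp [mbStepA, mbUnz, this]
      rw [hstep, ih (cur ++ [p]) out (by simp) (by simp at h2 ⊢; omega)]
      simp

-- pyRange with positive step: nil and cons forms
theorem mbRange_nil (a b s : Int) (hs : 0 < s) (h : b ≤ a) : PySem.List.pyRange a b s = [] := by
  rw [PySem.List.pyRange_of_pos _ _ hs]
  simp [not_lt.mpr h]

theorem mbRange_cons (a b s : Int) (hs : 0 < s) (h : a < b) :
    PySem.List.pyRange a b s = a :: PySem.List.pyRange (a + s) b s := by
  rw [PySem.List.pyRange_of_pos a b hs, PySem.List.pyRange_of_pos (a + s) b hs]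
  have hdiv : (b - a + s - 1) / s = (b - a - 1) / s + 1 := by
    have key : b - a + s - 1 = (b - a - 1) + 1 * s := by ring
    rw [key, Int.add_mul_ediv_right _ _ (ne_of_gt hs)]
  have h0 : 0 ≤ (b - a - 1) / s := Int.ediv_nonneg (by omega) (le_of_lt hs)
  have hq : (b - a + s - 1) / s = ((b - a - 1) / s).toNat + 1 := by omega
  rw [if_pos h, hdiv]
  have htn : ((b - a - 1) / s + 1).toNat = ((b - a - 1) / s).toNat + 1 := by omega
  rw [htn, List.range_succ_eq_map, List.map_cons]
  congr 1
  · simp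
  · rw [List.map_map]
    by_cases hb : a + s < b
    · rw [if_pos hb]
      have : b - (a + s) + s - 1 = b - a - 1 := by ring
      rw [this]
      apply List.map_congr_left
      intro k _
      simp [Function.comp]
      ring
    · rw [if_neg hb]
      have hz : (b - a - 1) / s = 0 := by
        apply Int.ediv_eq_zero_of_lt (by omega) (by omega)
      rw [hz]
      simp

-- B's fold, characterized by chunks: the short last chunk gets a prefix of L appended
theorem mbFoldB (c : Nat) (L : List (Int × Int)) (d : Nat) :
    ∀ (i : Nat) (acc : List (List Int × List Int)),
      L.length - i ≤ d → L.drop i ≠ [] →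
      (PySem.List.pyRange (i : Int) (L.length : Int) ((c : Int) + 1)).foldl
        (mbBodyB ((c : Int) + 1) L) acc =
      acc ++ ((mbChunks c (L.drop i)).dropLast).map mbUnz ++
        [mbUnz (mbLast (mbChunks c (L.drop i)) ++
          L.take (((c : Int) + 1 - ((mbLast (mbChunks c (L.drop i))).length : Int)).toNat))] := by
  induction d with
  | zero =>
    intro i acc hd hne
    have : i < L.length := by
      by_contra hcon
      exact hne (List.drop_of_length_le (by omega))
    omega
  | succ d ih =>
    intro i acc hd hne
    have hi : i < L.length := by
      by_contra hcon
      exact hne (List.drop_of_length_le (by omega))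
    have hcast : (i : Int) + ((c : Int) + 1) = ((i + (c + 1) : Nat) : Int) := by push_cast; ring
    rw [mbRange_cons _ _ _ (by omega) (by exact_mod_cast hi), List.foldl_cons]
    have hchunk : PySem.List.slice L (some (i : Int)) (some ((i : Int) + ((c : Int) + 1)))
        = (L.drop i).take (c + 1) := by
      rw [hcast]
      exact_mod_cast PySem.List.slice_natCast_add L i (c + 1)
    by_cases hbig : i + (c + 1) < L.length
    · -- full, non-last chunk: no padding
      have hclen : ((L.drop i).take (c + 1)).length = c + 1 := by
        simp [List.length_take]; omega
      have hfull : ¬ ((((L.drop i).take (c + 1)).length : Int) < (c : Int) + 1) := by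
        rw [hclen]; push_cast; omega
      obtain ⟨a, t, hat⟩ : ∃ a t, L.drop i = a :: t := by
        cases h : L.drop i with
        | nil => exact absurd h hne
        | cons a t => exact ⟨a, t, rfl⟩
      have hlen : c < t.length := by
        have := congrArg List.length hat
        simp at this
        omega
      have hdrop : t.drop c = L.drop (i + (c + 1)) := by
        have h1 : t = (L.drop i).drop 1 := by rw [hat]; simp
        rw [h1, List.drop_drop, List.drop_drop]
        congr 1
        omega
      have hch : mbChunks c (L.drop i)
          = ((L.drop i).take (c + 1)) :: mbChunks c (L.drop (i + (c + 1))) := by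
        rw [hat, mbChunks_cons, ← hdrop]
        simp [List.take_succ_cons]
      have hne' : L.drop (i + (c + 1)) ≠ [] := by
        intro h
        have := congrArg List.length h
        simp at this
        omega
      have hcne : mbChunks c (L.drop (i + (c + 1))) ≠ [] := mbChunks_ne_nil c _ hne'
      simp only [mbBodyB, hchunk, if_neg hfull]
      rw [hcast, ih (i + (c + 1))
        (acc ++ [(((L.drop i).take (c + 1)).map Prod.fst, ((L.drop i).take (c + 1)).map Prod.snd)])
        (by omega) hne']
      rw [hch, List.dropLast_cons_of_ne_nil hcne, mbLast_cons hcne]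
      simp [mbUnz]
    · -- last chunk: pad with L's prefix (a no-op when the chunk is exactly full)
      have hsmall : (L.drop i).length ≤ c + 1 := by simp; omega
      have htake : (L.drop i).take (c + 1) = L.drop i := List.take_of_length_le hsmall
      have hnil : PySem.List.pyRange ((i : Int) + ((c : Int) + 1)) (L.length : Int) ((c : Int) + 1) = [] := by
        apply mbRange_nil _ _ _ (by omega)
        omega
      have hpref : ∀ ch2 : List (Int × Int),
          ch2 = (if (((L.drop i).length : Int) < (c : Int) + 1)
            then L.drop i ++ PySem.List.slice L none (some ((c : Int) + 1 - ((L.drop i).length : Int)))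
            else L.drop i) →
          ch2 = L.drop i ++ L.take (((c : Int) + 1 - ((L.drop i).length : Int)).toNat) := by
        intro ch2 hch2
        by_cases hlt : (((L.drop i).length : Int) < (c : Int) + 1)
        · rw [hch2, if_pos hlt]
          congr 1
          have hk : ((c : Int) + 1 - ((L.drop i).length : Int))
              = (((( (c : Int) + 1 - ((L.drop i).length : Int)).toNat : Nat)) : Int) := by omega
          rw [hk, PySem.List.slice_to_natCast]
          simp
        · rw [hch2, if_neg hlt]
          have hge : c + 1 ≤ (L.drop i).length := by exact_mod_cast not_lt.mp hlt
          simp at hge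
          simp
          exact Or.inl (by omega)
      simp only [mbBodyB, hchunk, htake, hnil, List.foldl_nil]
      rw [hpref _ rfl]
      rw [mbChunks_small c _ hne hsmall]
      simp [mbLast, mbUnz]

-- ===== VERDICT (by name: the statement is the Claim_ definition above) =====
theorem minibatches_spec : Claim_equal_minibatches := by
  intro inputs targets m _ hm
  unfold Spec_minibatches minibatches minibatches_alt
  dsimp only
  have hm1 : 1 ≤ m := hm
  set c : Nat := (m - 1).toNat with hc
  have hm' : m = (c : Int) + 1 := by simp [hc]; omega
  set zs := inputs.zip targets with hzs
  by_cases hz : zs = []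
  · rw [hz]
    simp [mbRange_nil 0 0 m (by omega) le_rfl]
  · obtain ⟨p, rest, hpr⟩ := List.exists_cons_of_ne_nil hz
    -- A side
    have hstep0 : mbStepA m (([], [], []) : List (List Int × List Int) × List Int × List Int) p
        = ([], mbUnz [p]) := by
      simp [mbStepA, mbUnz]
      intro h
      omega
    have hA : zs.foldl (mbStepA m) ([], [], [])
        = ([] ++ ((mbChunks c zs).dropLast).map mbUnz, mbUnz (mbLast (mbChunks c zs))) := by
      rw [hpr, List.foldl_cons, hstep0, hm']
      exact mbFoldA c rest [p] [] (by simp) (by simp)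
    obtain ⟨hlne, hlle⟩ := mbLast_chunks_prop c zs.length zs le_rfl hz
    rw [hA, if_pos (by simpa [mbUnz] using hlne)]
    have hle : ((mbLast (mbChunks c zs)).length : Int) ≤ (c : Int) + 1 := by
      exact_mod_cast hlle
    have hpad := mbPadA_eq_take m zs ((mbLast (mbChunks c zs)).map Prod.fst)
      ((mbLast (mbChunks c zs)).map Prod.snd) (by simp) (by simp; omega)
    -- B side
    have hB := mbFoldB c zs zs.length 0 [] (by omega) (by simpa using hz)
    simp only [List.drop_zero, Nat.cast_zero] at hB
    rw [hm'] at hpad ⊢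
    rw [hB]
    simp only [mbUnz]
    rw [hpad]
    simp
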